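-- pv_equiv track=rewrite | github.com/JesseZhuang/InCodeLearning-Python3 | algorithm/tree/min_reverse_ops.py | minReverseOperations
-- ===== SOURCE A (Python) =====
-- from collections import deque
-- from typing import List
--
-- def minReverseOperations(n: int, p: int, banned: List[int], k: int) -> List[int]:
--     res = [-1] * n
--     for node in banned: res[node] = -2  # to speed up iterations
--     q = deque([p])
--     depth = 0
--     res[p] = depth
--     step = k - 1
--
--     next_nei_s = [i + 2 for i in range(n)]  # might be out of range, next neighbor to visit
--
--     while q:
--         depth += 1
--         size = len(q)
--         for i in range(size):
--             cur = q.popleft()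
--             lo = max(cur - step, 0)
--             hi = min(cur, n - k)  # Inclusive
--             lo = 2 * lo + k - 1 - cur
--             hi = 2 * hi + k - 1 - cur  # Inclusive
--             # set next_nei_s[nei] to hi + 2 for every visited nei.
--             post_hi = hi + 2
--             nei = lo
--             while nei <= hi:
--                 next_nei = next_nei_s[nei]
--                 next_nei_s[nei] = post_hi
--                 if res[nei] == -1:
--                     q.append(nei)
--                     res[nei] = depth
--                 nei = next_nei
--     # Mark all banned positions as -1 (see above).
--     for node in banned: res[node] = -1
--     return res
-- ===== SOURCE B (Python) =====
-- from collections import deque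
-- from bisect import bisect_left, bisect_right
--
-- def minReverseOperations(n, p, banned, k):
--     res = [-1] * n
--     for node in banned:
--         res[node] = -2
--     res[p] = 0
--     # still-unvisited, non-banned indices, split by parity, kept sorted
--     buckets = [[i for i in range(0, n, 2) if res[i] == -1],
--                [i for i in range(1, n, 2) if res[i] == -1]]
--     q = deque([p])
--     depth = 0
--     while q:
--         depth += 1
--         for _ in range(len(q)):
--             cur = q.popleft()
--             lo = 2 * max(cur - k + 1, 0) + k - 1 - cur
--             hi = 2 * min(cur, n - k) + k - 1 - cur
--             if lo > hi:
--                 continue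
--             bucket = buckets[lo % 2]
--             i, j = bisect_left(bucket, lo), bisect_right(bucket, hi)
--             for nei in bucket[i:j]:
--                 res[nei] = depth
--                 q.append(nei)
--             del bucket[i:j]
--     for node in banned:
--         res[node] = -1
--     return res
-- ===== Notes on version B (the rewrite author's own statement) =====
-- stated objective: alternative
-- what changed: Replaces A's next-neighbor pointer-jumping array by two sorted buckets of still-unvisited indices split by parity, sliced per BFS node with binary search (bisect) and removed in bulk.
import Mathlib
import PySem

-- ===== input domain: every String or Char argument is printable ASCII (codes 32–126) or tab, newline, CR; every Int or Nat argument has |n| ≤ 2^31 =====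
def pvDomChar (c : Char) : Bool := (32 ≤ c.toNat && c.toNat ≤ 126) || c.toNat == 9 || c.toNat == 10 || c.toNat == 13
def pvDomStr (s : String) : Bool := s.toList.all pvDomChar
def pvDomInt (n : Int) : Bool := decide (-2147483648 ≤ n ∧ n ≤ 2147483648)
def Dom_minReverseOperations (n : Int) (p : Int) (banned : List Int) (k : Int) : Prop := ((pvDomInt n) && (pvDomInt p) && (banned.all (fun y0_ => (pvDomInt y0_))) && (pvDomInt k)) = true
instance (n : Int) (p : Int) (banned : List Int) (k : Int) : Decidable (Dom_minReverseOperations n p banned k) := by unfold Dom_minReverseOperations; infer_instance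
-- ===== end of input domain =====

-- B replaces A's next-pointer jump array by two sorted buckets (unvisited indices split
-- by parity) sliced with binary search; objective: alternative data structure, same results.

-- ===== PORT A =====
-- inner 'while nei <= hi' loop of A; the fuel argument only makes the recursion structural
def pvInnerA (hi postHi depth : Int) : Nat → Int → List Int → List Int → List Int → List Int × List Int × List Int
  | 0, _, res, nxt, q => (res, nxt, q)
  | fuel + 1, nei, res, nxt, q =>
    if nei ≤ hi then
      -- next_nei is read from next_nei_s BEFORE next_nei_s[nei] is overwritten with post_hi
      if PySem.List.pyGetD res nei 0 = -1 then
        pvInnerA hi postHi depth fuel (PySem.List.pyGetD nxt nei 0)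
          (PySem.List.pySetD res nei depth) (PySem.List.pySetD nxt nei postHi) (q ++ [nei])
      else
        pvInnerA hi postHi depth fuel (PySem.List.pyGetD nxt nei 0)
          res (PySem.List.pySetD nxt nei postHi) q
    else (res, nxt, q)

-- 'for i in range(size)' loop of A: pops the popped layer prefix, accumulates the appended tail
def pvLayerA (n k depth : Int) : List Int → List Int → List Int → List Int → List Int × List Int × List Int
  | [], res, nxt, q => (res, nxt, q)
  | cur :: rest, res, nxt, q =>
    let lo := max (cur - (k - 1)) 0
    let hi := min cur (n - k)
    let lo' := 2 * lo + k - 1 - cur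
    let hi' := 2 * hi + k - 1 - cur
    let s := pvInnerA hi' (hi' + 2) depth (n.toNat + 1) lo' res nxt q
    pvLayerA n k depth rest s.1 s.2.1 s.2.2

-- 'while q' loop of A; fuel only makes the recursion structural
def pvBfsA (n k : Int) : Nat → List Int → Int → List Int → List Int → List Int
  | 0, _, _, res, _ => res
  | fuel + 1, q, depth, res, nxt =>
    if q = [] then res
    else
      let s := pvLayerA n k (depth + 1) q res nxt []
      pvBfsA n k fuel s.2.2 (depth + 1) s.1 s.2.1

def minReverseOperations (n : Int) (p : Int) (banned : List Int) (k : Int) : List Int :=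
  let res := List.replicate n.toNat (-1 : Int)
  let res := banned.foldl (fun r node => PySem.List.pySetD r node (-2)) res
  let depth : Int := 0
  let res := PySem.List.pySetD res p depth
  let nxt := (PySem.List.pyRange 0 n 1).map (fun i => i + 2)
  let res := pvBfsA n k (n.toNat + 2) [p] depth res nxt
  banned.foldl (fun r node => PySem.List.pySetD r node (-1)) res

-- ===== PORT B =====
-- bisect.bisect_left / bisect_right, ported by their contract on sorted lists
def pvBisectLeft (l : List Int) (x : Int) : Nat := (l.takeWhile (fun y => y < x)).length
def pvBisectRight (l : List Int) (x : Int) : Nat := (l.takeWhile (fun y => y ≤ x)).length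

-- 'for _ in range(len(q))' loop of B over the popped layer; buckets ev/od are sorted
def pvLayerB (n k depth : Int) : List Int → List Int → List Int → List Int → List Int → List Int × List Int × List Int × List Int
  | [], res, ev, od, q => (res, ev, od, q)
  | cur :: rest, res, ev, od, q =>
    let lo := 2 * max (cur - k + 1) 0 + k - 1 - cur
    let hi := 2 * min cur (n - k) + k - 1 - cur
    if hi < lo then pvLayerB n k depth rest res ev od q
    else
      let bucket := if PySem.Int.mod lo 2 = 0 then ev else od
      let i := pvBisectLeft bucket lo
      let j := pvBisectRight bucket hi
      let chunk := (bucket.drop i).take (j - i)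
      let res' := chunk.foldl (fun r nei => PySem.List.pySetD r nei depth) res
      let bucket' := bucket.take i ++ bucket.drop j
      if PySem.Int.mod lo 2 = 0 then pvLayerB n k depth rest res' bucket' od (q ++ chunk)
      else pvLayerB n k depth rest res' ev bucket' (q ++ chunk)

-- 'while q' loop of B; fuel only makes the recursion structural
def pvBfsB (n k : Int) : Nat → List Int → Int → List Int → List Int → List Int → List Int
  | 0, _, _, res, _, _ => res
  | fuel + 1, q, depth, res, ev, od =>
    if q = [] then res
    else
      let s := pvLayerB n k (depth + 1) q res ev od []
      pvBfsB n k fuel s.2.2.2 (depth + 1) s.1 s.2.1 s.2.2.1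

def minReverseOperations_alt (n : Int) (p : Int) (banned : List Int) (k : Int) : List Int :=
  let res := List.replicate n.toNat (-1 : Int)
  let res := banned.foldl (fun r node => PySem.List.pySetD r node (-2)) res
  let res := PySem.List.pySetD res p 0
  let ev := (PySem.List.pyRange 0 n 2).filter (fun i => decide (PySem.List.pyGetD res i 0 = -1))
  let od := (PySem.List.pyRange 1 n 2).filter (fun i => decide (PySem.List.pyGetD res i 0 = -1))
  let res := pvBfsB n k (n.toNat + 2) [p] 0 res ev od
  banned.foldl (fun r node => PySem.List.pySetD r node (-1)) res

-- ===== PRECONDITION & SPEC =====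
-- Pre_ excludes exactly the inputs on which A raises IndexError: a start position p or a
-- banned entry outside the index range [-n, n) of the length-n result list.
def Pre_minReverseOperations (n : Int) (p : Int) (banned : List Int) (k : Int) : Prop :=
  (-n ≤ p ∧ p < n) ∧ ∀ b ∈ banned, -n ≤ b ∧ b < n
instance (n : Int) (p : Int) (banned : List Int) (k : Int) : Decidable (Pre_minReverseOperations n p banned k) := by unfold Pre_minReverseOperations; infer_instance

def pvWitness_minReverseOperations : Int × Int × List Int × Int := (6, 2, [1, 4], 3)

def Spec_minReverseOperations (n : Int) (p : Int) (banned : List Int) (k : Int) (out : List Int) : Prop := out = minReverseOperations_alt n p banned k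
instance (n : Int) (p : Int) (banned : List Int) (k : Int) (out : List Int) : Decidable (Spec_minReverseOperations n p banned k out) := by unfold Spec_minReverseOperations; infer_instance

-- ===== CLAIM (what is proved, stated in full; the proofs are below) =====
def Claim_equal_minReverseOperations : Prop := ∀ (n : Int) (p : Int) (banned : List Int) (k : Int), Dom_minReverseOperations n p banned k → Pre_minReverseOperations n p banned k → Spec_minReverseOperations n p banned k (minReverseOperations n p banned k)

-- ===== LEMMAS AND PROOFS =====

-- the even-step scan [a, a+2, ..] up to b keeping the still-unvisited (res = -1) positions
def pvScan (res : List Int) (a b : Int) : List Int :=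
  if h : a ≤ b then
    (if PySem.List.pyGetD res a 0 = -1 then [a] else []) ++ pvScan res (a + 2) b
  else []
  termination_by (b + 1 - a).toNat
  decreasing_by omega

def pvApply (res : List Int) (S : List Int) (d : Int) : List Int :=
  S.foldl (fun r x => PySem.List.pySetD r x d) res

def PvPtrInv (n : Int) (res nxt : List Int) : Prop :=
  ∀ i : Int, 0 ≤ i → i < n →
    i + 2 ≤ PySem.List.pyGetD nxt i 0 ∧ (PySem.List.pyGetD nxt i 0 - i) % 2 = 0 ∧
    ∀ j : Int, i < j → j < PySem.List.pyGetD nxt i 0 → (j - i) % 2 = 0 →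
      PySem.List.pyGetD res j 0 ≠ -1

def PvMidInv (n lo hi nei : Int) (res nxt : List Int) : Prop :=
  ∀ i : Int, 0 ≤ i → i < n →
    i + 2 ≤ PySem.List.pyGetD nxt i 0 ∧ (PySem.List.pyGetD nxt i 0 - i) % 2 = 0 ∧
    ∀ j : Int, i < j → j < PySem.List.pyGetD nxt i 0 → (j - i) % 2 = 0 →
      PySem.List.pyGetD res j 0 ≠ -1 ∨ (i < nei ∧ nei ≤ j ∧ j ≤ hi ∧ (j - lo) % 2 = 0)

def pvFilt (res : List Int) (par n : Int) : List Int :=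
  (PySem.List.pyRange par n 2).filter (fun i => decide (PySem.List.pyGetD res i 0 = -1))

def PvR (n : Int) (res nxt ev od : List Int) : Prop :=
  res.length = n.toNat ∧ nxt.length = n.toNat ∧ PvPtrInv n res nxt ∧
  ev = pvFilt res 0 n ∧ od = pvFilt res 1 n

lemma pvScan_neg (res : List Int) {a b : Int} (h : b < a) : pvScan res a b = [] := by
  rw [pvScan, dif_neg (by omega)]

lemma pvScan_cons (res : List Int) {a b : Int} (h : a ≤ b) :
    pvScan res a b = (if PySem.List.pyGetD res a 0 = -1 then [a] else []) ++ pvScan res (a + 2) b := by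
  rw [pvScan, dif_pos h]

lemma pvScan_mem_iff (res : List Int) (a b x : Int) :
    x ∈ pvScan res a b ↔ a ≤ x ∧ x ≤ b ∧ (x - a) % 2 = 0 ∧ PySem.List.pyGetD res x 0 = -1 := by
  by_cases h : a ≤ b
  · rw [pvScan_cons res h]
    simp only [List.mem_append, pvScan_mem_iff res (a + 2) b x]
    split_ifs with hres
    · simp only [List.mem_singleton]
      constructor
      · rintro (rfl | ⟨h1, h2, h3, h4⟩)
        · exact ⟨le_refl _, h, by omega, hres⟩
        · exact ⟨by omega, h2, by omega, h4⟩
      · rintro ⟨h1, h2, h3, h4⟩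
        by_cases hxa : x = a
        · exact Or.inl hxa
        · exact Or.inr ⟨by omega, h2, by omega, h4⟩
    · simp only [List.not_mem_nil, false_or]
      constructor
      · rintro ⟨h1, h2, h3, h4⟩
        exact ⟨by omega, h2, by omega, h4⟩
      · rintro ⟨h1, h2, h3, h4⟩
        refine ⟨?_, h2, by omega, h4⟩
        rcases lt_or_eq_of_le h1 with h5 | h5
        · omega
        · exact absurd (h5 ▸ h4) hres
  · rw [pvScan_neg res (by omega)]
    simp only [List.not_mem_nil, false_iff]
    rintro ⟨h1, h2, _, _⟩
    omega
  termination_by (b + 1 - a).toNat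
  decreasing_by omega

lemma pvScan_congr {res res' : List Int} {a b : Int}
    (h : ∀ x, a ≤ x → x ≤ b → (x - a) % 2 = 0 → PySem.List.pyGetD res x 0 = PySem.List.pyGetD res' x 0) :
    pvScan res a b = pvScan res' a b := by
  by_cases hab : a ≤ b
  · rw [pvScan_cons res hab, pvScan_cons res' hab,
      h a (le_refl _) hab (by omega),
      pvScan_congr (res := res) (res' := res') (a := a + 2) (b := b)
        (fun x h1 h2 h3 => h x (by omega) h2 (by omega))]
  · rw [pvScan_neg res (by omega), pvScan_neg res' (by omega)]
  termination_by (b + 1 - a).toNat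
  decreasing_by omega

lemma pvScan_skip {res : List Int} {a b c : Int} (hac : a ≤ c) (hpar : (c - a) % 2 = 0)
    (h : ∀ x, a ≤ x → x < c → (x - a) % 2 = 0 → PySem.List.pyGetD res x 0 ≠ -1) :
    pvScan res a b = pvScan res c b := by
  rcases lt_or_eq_of_le hac with hlt | rfl
  · by_cases hab : a ≤ b
    · rw [pvScan_cons res hab, if_neg (h a (le_refl _) hlt (by omega))]
      simp only [List.nil_append]
      exact pvScan_skip (by omega) (by omega)
        (fun x h1 h2 h3 => h x (by omega) (by omega) (by omega))
    · rw [pvScan_neg res (by omega), pvScan_neg res (by omega)]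
  · rfl
  termination_by (c - a).toNat
  decreasing_by omega

lemma pvGetD_setD (res : List Int) (x y v : Int) (hx0 : 0 ≤ x) (hx : x < (res.length : Int))
    (hy : 0 ≤ y) :
    PySem.List.pyGetD (PySem.List.pySetD res x v) y 0 = if y = x then v else PySem.List.pyGetD res y 0 := by
  rw [PySem.List.pySetD_of_nonneg res v hx0]
  have hxn : x = ((x.toNat : Nat) : Int) := by omega
  have hyn : y = ((y.toNat : Nat) : Int) := by omega
  rw [hxn, hyn, PySem.List.pyGetD_natCast, PySem.List.pyGetD_natCast]
  have hxy : ((y.toNat : Nat) : Int) = ((x.toNat : Nat) : Int) ↔ x.toNat = y.toNat := by omega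
  simp only [List.getD_eq_getElem?_getD, List.getElem?_set, Int.toNat_natCast]
  by_cases hc : x.toNat = y.toNat
  · rw [if_pos hc, if_pos (by omega), if_pos (hxy.mpr hc)]
    rfl
  · rw [if_neg hc, if_neg (fun hh => hc (hxy.mp hh))]

lemma pvApply_length (S : List Int) (res : List Int) (d : Int) :
    (pvApply res S d).length = res.length := by
  induction S generalizing res with
  | nil => rfl
  | cons x S ih =>
    show (pvApply (PySem.List.pySetD res x d) S d).length = res.length
    rw [ih, PySem.List.length_pySetD]

lemma pvApply_getD (S : List Int) (res : List Int) (d y : Int)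
    (hS : ∀ x ∈ S, 0 ≤ x ∧ x < (res.length : Int)) (hy : 0 ≤ y) :
    PySem.List.pyGetD (pvApply res S d) y 0 = if y ∈ S then d else PySem.List.pyGetD res y 0 := by
  induction S generalizing res with
  | nil => simp [pvApply]
  | cons x S ih =>
    obtain ⟨hx0, hxl⟩ := hS x (List.mem_cons_self ..)
    have hstep : pvApply res (x :: S) d = pvApply (PySem.List.pySetD res x d) S d := rfl
    rw [hstep, ih (PySem.List.pySetD res x d)
      (fun z hz => by
        have := hS z (List.mem_cons_of_mem _ hz)
        rwa [PySem.List.length_pySetD])]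
    rw [pvGetD_setD res x y d hx0 hxl hy]
    by_cases hyS : y ∈ S
    · simp [hyS, List.mem_cons]
    · by_cases hyx : y = x <;> simp [hyS, hyx, List.mem_cons]

lemma pvRange2_nil {a b : Int} (h : b ≤ a) : PySem.List.pyRange a b 2 = [] := by
  rw [PySem.List.pyRange_of_pos a b (by norm_num), if_neg (by omega)]
  rfl

lemma pvRange2_cons {a b : Int} (h : a < b) :
    PySem.List.pyRange a b 2 = a :: PySem.List.pyRange (a + 2) b 2 := by
  rw [PySem.List.pyRange_of_pos a b (by norm_num),
    PySem.List.pyRange_of_pos (a + 2) b (by norm_num)]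
  have hc : (if a < b then ((b - a + 2 - 1) / 2).toNat else 0)
      = (if a + 2 < b then ((b - (a + 2) + 2 - 1) / 2).toNat else 0) + 1 := by
    split_ifs <;> omega
  rw [hc, List.range_succ_eq_map, List.map_cons, List.map_map]
  simp only [Nat.cast_zero, mul_zero, add_zero]
  congr 1
  refine List.map_congr_left ?_
  intro kk _
  simp only [Function.comp_apply, Nat.succ_eq_add_one]
  push_cast
  ring

lemma pvRange2_append {a m b : Int} (h1 : a ≤ m) (h2 : m ≤ b) (hp : (m - a) % 2 = 0) :
    PySem.List.pyRange a b 2 = PySem.List.pyRange a m 2 ++ PySem.List.pyRange m b 2 := by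
  by_cases hm : a = m
  · subst hm
    rw [pvRange2_nil (le_refl a), List.nil_append]
  · rw [pvRange2_cons (a := a) (b := b) (by omega), pvRange2_cons (a := a) (b := m) (by omega)]
    rw [List.cons_append,
      pvRange2_append (a := a + 2) (m := m) (b := b) (by omega) h2 (by omega)]
  termination_by (m - a).toNat
  decreasing_by omega

lemma pvRange2_pairwise (a b : Int) : (PySem.List.pyRange a b 2).Pairwise (· < ·) := by
  rw [PySem.List.pyRange_of_pos a b (by norm_num)]
  refine List.pairwise_map.mpr (List.pairwise_lt_range.imp ?_)
  intro x y hxy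
  omega

lemma pvMod2 (a : Int) (h : 0 ≤ a) : PySem.Int.mod a 2 = a % 2 := by
  simp [PySem.Int.mod, Int.fmod_eq_emod]

-- bisect slicing of a sorted list = the two complementary range filters
lemma pvSlice_sorted (lo hi : Int) (hlohi : lo ≤ hi) :
    ∀ l : List Int, l.Pairwise (· < ·) →
      ((l.drop (pvBisectLeft l lo)).take (pvBisectRight l hi - pvBisectLeft l lo)
          = l.filter (fun x => decide (lo ≤ x) && decide (x ≤ hi)))
      ∧ (l.take (pvBisectLeft l lo) ++ l.drop (pvBisectRight l hi)
          = l.filter (fun x => !(decide (lo ≤ x) && decide (x ≤ hi)))) := by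
  intro l hl
  induction l with
  | nil => simp [pvBisectLeft, pvBisectRight]
  | cons x t ih =>
    obtain ⟨hx, ht⟩ := List.pairwise_cons.mp hl
    obtain ⟨ih1, ih2⟩ := ih ht
    by_cases h1 : x < lo
    · have h2 : x ≤ hi := by omega
      have e1 : pvBisectLeft (x :: t) lo = pvBisectLeft t lo + 1 := by
        simp [pvBisectLeft, h1]
      have e2 : pvBisectRight (x :: t) hi = pvBisectRight t hi + 1 := by
        simp [pvBisectRight, h2]
      constructor
      · rw [e1, e2, Nat.add_sub_add_right, List.drop_succ_cons, List.filter_cons]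
        simp only [show ¬ lo ≤ x by omega, decide_false, Bool.false_and, Bool.false_and]
        exact ih1
      · rw [e1, e2, List.take_succ_cons, List.drop_succ_cons, List.filter_cons]
        simp only [show ¬ lo ≤ x by omega, decide_false, Bool.false_and, Bool.not_false,
          List.cons_append]
        rw [ih2]
        simp
    · by_cases h2 : x ≤ hi
      · have e1 : pvBisectLeft (x :: t) lo = 0 := by
          simp [pvBisectLeft, h1]
        have e2 : pvBisectRight (x :: t) hi = pvBisectRight t hi + 1 := by
          simp [pvBisectRight, h2]
        have hbt : pvBisectLeft t lo = 0 := by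
          cases t with
          | nil => rfl
          | cons y t' =>
            have hy : x < y := hx y (List.mem_cons_self ..)
            simp [pvBisectLeft, show ¬ y < lo by omega]
        rw [hbt] at ih1 ih2
        simp only [Nat.sub_zero, List.drop_zero, List.take_zero, List.nil_append] at ih1 ih2
        constructor
        · rw [e1, e2, Nat.sub_zero, List.drop_zero, List.take_succ_cons, List.filter_cons]
          simp only [show lo ≤ x by omega, h2, decide_true, Bool.and_self]
          rw [ih1]
          simp
        · rw [e1, e2, List.take_zero, List.nil_append, List.drop_succ_cons, List.filter_cons]
          simp only [show lo ≤ x by omega, h2, decide_true, Bool.and_self,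
            Bool.not_true]
          rw [ih2]
          simp
      · have e1 : pvBisectLeft (x :: t) lo = 0 := by
          simp [pvBisectLeft, show ¬ x < lo by omega]
        have e2 : pvBisectRight (x :: t) hi = 0 := by
          simp [pvBisectRight, h2]
        constructor
        · rw [e1, e2]
          simp only [Nat.sub_zero, List.take_zero, List.drop_zero]
          symm
          rw [List.filter_eq_nil_iff]
          intro a ha
          rcases List.mem_cons.mp ha with rfl | hat
          · simp
            omega
          · have := hx a hat
            simp
            omega
        · rw [e1, e2]
          simp only [List.take_zero, List.drop_zero, List.nil_append]
          symm
          rw [List.filter_eq_self]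
          intro a ha
          rcases List.mem_cons.mp ha with rfl | hat
          · simp
            omega
          · have := hx a hat
            simp
            omega

lemma pvFiltClip (res : List Int) (lo hi nn a : Int) (ha : lo ≤ a) (hp : (a - lo) % 2 = 0)
    (hnn : hi < nn) :
    (PySem.List.pyRange a nn 2).filter
        (fun x => (decide (lo ≤ x) && decide (x ≤ hi)) && decide (PySem.List.pyGetD res x 0 = -1))
      = pvScan res a hi := by
  by_cases han : a < nn
  · rw [pvRange2_cons han, List.filter_cons,
      pvFiltClip res lo hi nn (a + 2) (by omega) (by omega) hnn]
    by_cases hahi : a ≤ hi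
    · rw [pvScan_cons res hahi]
      simp only [show lo ≤ a from ha, hahi, decide_true, Bool.and_self]
      by_cases hres : PySem.List.pyGetD res a 0 = -1 <;> simp [hres]
    · rw [pvScan_neg res (by omega), pvScan_neg res (by omega)]
      simp [hahi]
  · rw [pvRange2_nil (by omega), pvScan_neg res (by omega)]
    rfl
  termination_by (nn - a).toNat
  decreasing_by omega

-- the in-range filter of a parity bucket is the even-step scan
lemma pvBucket_range (res : List Int) (n lo hi : Int) (hlo : 0 ≤ lo) (hhi : hi < n)
    (hlohi : lo ≤ hi) (par : Int) (hpar0 : 0 ≤ par) (hparlo : par ≤ lo)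
    (hp : (lo - par) % 2 = 0) :
    (pvFilt res par n).filter (fun x => decide (lo ≤ x) && decide (x ≤ hi)) = pvScan res lo hi := by
  unfold pvFilt
  rw [List.filter_filter,
    pvRange2_append (a := par) (m := lo) (b := n) hparlo (by omega) (by omega),
    List.filter_append]
  have h1 : (PySem.List.pyRange par lo 2).filter
      (fun x => (decide (lo ≤ x) && decide (x ≤ hi)) && decide (PySem.List.pyGetD res x 0 = -1))
      = [] := by
    rw [List.filter_eq_nil_iff]
    intro x hxmem
    obtain ⟨_, hx2, _⟩ := (PySem.List.mem_pyRange_iff_of_pos (by norm_num) x).mp hxmem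
    simp
    omega
  rw [h1, List.nil_append]
  exact pvFiltClip res lo hi n lo (le_refl _) (by omega) hhi

-- the remainder of the sliced bucket is the bucket of the updated res
lemma pvBucket_rest (res : List Int) (n lo hi depth : Int) (hlo : 0 ≤ lo) (hhi : hi < n)
    (hlohi : lo ≤ hi) (hd : depth ≠ -1) (hlen : res.length = n.toNat)
    (par : Int) (hpar0 : 0 ≤ par) (hparlo : par ≤ lo) (hp : (lo - par) % 2 = 0) :
    (pvFilt res par n).filter (fun x => !(decide (lo ≤ x) && decide (x ≤ hi)))
      = pvFilt (pvApply res (pvScan res lo hi) depth) par n := by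
  unfold pvFilt
  rw [List.filter_filter]
  refine List.filter_congr ?_
  intro x hxmem
  obtain ⟨hx1, hx2, hx3⟩ := (PySem.List.mem_pyRange_iff_of_pos (by norm_num) x).mp hxmem
  have hSb : ∀ z ∈ pvScan res lo hi, 0 ≤ z ∧ z < (res.length : Int) := by
    intro z hz
    obtain ⟨e1, e2, _, _⟩ := (pvScan_mem_iff res lo hi z).mp hz
    constructor <;> omega
  rw [pvApply_getD _ res depth x hSb (by omega)]
  by_cases hxS : x ∈ pvScan res lo hi
  · obtain ⟨e1, e2, e3, e4⟩ := (pvScan_mem_iff res lo hi x).mp hxS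
    simp [hxS, e4, hd, e1, e2]
  · rw [if_neg hxS]
    by_cases hres : PySem.List.pyGetD res x 0 = -1
    · have hnin : ¬ (lo ≤ x ∧ x ≤ hi) := fun ⟨e1, e2⟩ =>
        hxS ((pvScan_mem_iff res lo hi x).mpr ⟨e1, e2, by omega, hres⟩)
      simp [hres]
      omega
    · simp [hres]

-- the untouched bucket (other parity) is unchanged
lemma pvBucket_other (res : List Int) (n lo hi depth : Int) (hlo : 0 ≤ lo) (hhi : hi < n)
    (hlen : res.length = n.toNat)
    (par : Int) (hpar0 : 0 ≤ par) (hp : (lo - par) % 2 = 1 ∨ (lo - par) % 2 = -1) :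
    pvFilt (pvApply res (pvScan res lo hi) depth) par n = pvFilt res par n := by
  unfold pvFilt
  refine List.filter_congr ?_
  intro x hxmem
  obtain ⟨hx1, hx2, hx3⟩ := (PySem.List.mem_pyRange_iff_of_pos (by norm_num) x).mp hxmem
  have hSb : ∀ z ∈ pvScan res lo hi, 0 ≤ z ∧ z < (res.length : Int) := by
    intro z hz
    obtain ⟨e1, e2, _, _⟩ := (pvScan_mem_iff res lo hi z).mp hz
    constructor <;> omega
  have hxS : x ∉ pvScan res lo hi := by
    intro hxS
    obtain ⟨e1, e2, e3, _⟩ := (pvScan_mem_iff res lo hi x).mp hxS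
    omega
  rw [pvApply_getD _ res depth x hSb (by omega), if_neg hxS]

-- the inner pointer-jumping loop of A visits exactly the scan, and restores the invariant
lemma pvInnerA_spec (n lo hi depth : Int) (hlo : 0 ≤ lo) (hhi : hi < n)
    (hpar : (hi - lo) % 2 = 0) (hd : depth ≠ -1) :
    ∀ (fuel : Nat) (nei : Int) (res nxt q : List Int),
      lo ≤ nei → (nei - lo) % 2 = 0 →
      res.length = n.toNat → nxt.length = n.toNat →
      hi + 2 - nei ≤ (fuel : Int) →
      PvMidInv n lo hi nei res nxt →
      (∀ x, lo ≤ x → x < nei → (x - lo) % 2 = 0 → PySem.List.pyGetD res x 0 ≠ -1) →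
      ∃ nxt', pvInnerA hi (hi + 2) depth fuel nei res nxt q
          = (pvApply res (pvScan res nei hi) depth, nxt', q ++ pvScan res nei hi)
        ∧ nxt'.length = n.toNat ∧ PvPtrInv n (pvApply res (pvScan res nei hi) depth) nxt' := by
  intro fuel
  induction fuel with
  | zero =>
    intro nei res nxt q h1 h2 hlr hln hfuel hmid hdone
    have hnei : hi < nei := by
      simp only [Nat.cast_zero] at hfuel
      omega
    rw [pvScan_neg res hnei]
    refine ⟨nxt, by simp [pvInnerA, pvApply], hln, ?_⟩
    intro i hi0 hin
    obtain ⟨g1, g2, g3⟩ := hmid i hi0 hin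
    refine ⟨g1, g2, fun j hj1 hj2 hj3 => ?_⟩
    rcases g3 j hj1 hj2 hj3 with h | h
    · exact h
    · omega
  | succ fuel ih =>
    intro nei res nxt q h1 h2 hlr hln hfuel hmid hdone
    by_cases hcase : nei ≤ hi
    · have hnei0 : (0 : Int) ≤ nei := by omega
      have hneiN : nei < n := by omega
      have hnn : (0 : Int) ≤ n := by omega
      obtain ⟨g1, g2, g3⟩ := hmid nei hnei0 hneiN
      set nv := PySem.List.pyGetD nxt nei 0 with hnv
      have hstrong : ∀ j, nei < j → j < nv → (j - nei) % 2 = 0 →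
          PySem.List.pyGetD res j 0 ≠ -1 := by
        intro j hj1 hj2 hj3
        rcases g3 j hj1 hj2 hj3 with h | h
        · exact h
        · omega
      rw [pvInnerA, if_pos hcase]
      have hgetnxt1 : ∀ y, 0 ≤ y →
          PySem.List.pyGetD (PySem.List.pySetD nxt nei (hi + 2)) y 0
            = if y = nei then hi + 2 else PySem.List.pyGetD nxt y 0 :=
        fun y hy => pvGetD_setD nxt nei y (hi + 2) hnei0 (by omega) hy
      by_cases hres : PySem.List.pyGetD res nei 0 = -1
      · rw [if_pos hres]
        have hget1 : ∀ y, 0 ≤ y →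
            PySem.List.pyGetD (PySem.List.pySetD res nei depth) y 0
              = if y = nei then depth else PySem.List.pyGetD res y 0 :=
          fun y hy => pvGetD_setD res nei y depth hnei0 (by omega) hy
        have hmid1 : PvMidInv n lo hi nv (PySem.List.pySetD res nei depth)
            (PySem.List.pySetD nxt nei (hi + 2)) := by
          intro i hi0 hin
          obtain ⟨m1, m2, m3⟩ := hmid i hi0 hin
          by_cases hieq : i = nei
          · subst hieq
            rw [hgetnxt1 i (by omega), if_pos rfl]
            refine ⟨by omega, by omega, fun j hj1 hj2 hj3 => ?_⟩
            by_cases hjlt : j < nv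
            · left
              rw [hget1 j (by omega), if_neg (by omega)]
              exact hstrong j hj1 hjlt hj3
            · right
              exact ⟨by omega, by omega, by omega, by omega⟩
          · rw [hgetnxt1 i hi0, if_neg hieq]
            refine ⟨m1, m2, fun j hj1 hj2 hj3 => ?_⟩
            rcases m3 j hj1 hj2 hj3 with hc1 | hc2
            · left
              rw [hget1 j (by omega)]
              split_ifs with hjn
              · exact hd
              · exact hc1
            · by_cases hjlt : j < nv
              · left
                rw [hget1 j (by omega)]
                split_ifs with hjn
                · exact hd
                · exact hstrong j (by omega) hjlt (by omega)
              · right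
                exact ⟨by omega, by omega, hc2.2.2.1, hc2.2.2.2⟩
        have hdone1 : ∀ x, lo ≤ x → x < nv → (x - lo) % 2 = 0 →
            PySem.List.pyGetD (PySem.List.pySetD res nei depth) x 0 ≠ -1 := by
          intro x e1 e2 e3
          rw [hget1 x (by omega)]
          split_ifs with hxn
          · exact hd
          · by_cases hxlt : x < nei
            · exact hdone x e1 hxlt e3
            · exact hstrong x (by omega) e2 (by omega)
        obtain ⟨nxt', heq, hlen', hptr'⟩ := ih nv (PySem.List.pySetD res nei depth)
          (PySem.List.pySetD nxt nei (hi + 2)) (q ++ [nei]) (by omega) (by omega)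
          (by rw [PySem.List.length_pySetD]; exact hlr)
          (by rw [PySem.List.length_pySetD]; exact hln)
          (by push_cast at hfuel ⊢; omega) hmid1 hdone1
        have hs1 : pvScan res nei hi
            = nei :: pvScan (PySem.List.pySetD res nei depth) nv hi := by
          rw [pvScan_cons res hcase, if_pos hres]
          show nei :: pvScan res (nei + 2) hi = _
          congr 1
          rw [pvScan_skip (res := res) (a := nei + 2) (b := hi) (c := nv) (by omega) (by omega)
            (fun x e1 e2 e3 => hstrong x (by omega) (by omega) (by omega))]
          exact pvScan_congr (fun x e1 e2 e3 => by
            rw [hget1 x (by omega), if_neg (by omega)])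
        have happ : pvApply res (pvScan res nei hi) depth
            = pvApply (PySem.List.pySetD res nei depth)
                (pvScan (PySem.List.pySetD res nei depth) nv hi) depth := by
          rw [hs1]
          rfl
        refine ⟨nxt', ?_, hlen', ?_⟩
        · rw [heq, happ, hs1]
          simp [List.append_assoc]
        · rw [happ]
          exact hptr'
      · rw [if_neg hres]
        have hmid1 : PvMidInv n lo hi nv res (PySem.List.pySetD nxt nei (hi + 2)) := by
          intro i hi0 hin
          obtain ⟨m1, m2, m3⟩ := hmid i hi0 hin
          by_cases hieq : i = nei
          · subst hieq
            rw [hgetnxt1 i (by omega), if_pos rfl]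
            refine ⟨by omega, by omega, fun j hj1 hj2 hj3 => ?_⟩
            by_cases hjlt : j < nv
            · exact Or.inl (hstrong j hj1 hjlt hj3)
            · exact Or.inr ⟨by omega, by omega, by omega, by omega⟩
          · rw [hgetnxt1 i hi0, if_neg hieq]
            refine ⟨m1, m2, fun j hj1 hj2 hj3 => ?_⟩
            rcases m3 j hj1 hj2 hj3 with hc1 | hc2
            · exact Or.inl hc1
            · by_cases hjlt : j < nv
              · by_cases hjn : j = nei
                · exact Or.inl (hjn ▸ hres)
                · exact Or.inl (hstrong j (by omega) hjlt (by omega))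
              · exact Or.inr ⟨by omega, by omega, hc2.2.2.1, hc2.2.2.2⟩
        have hdone1 : ∀ x, lo ≤ x → x < nv → (x - lo) % 2 = 0 →
            PySem.List.pyGetD res x 0 ≠ -1 := by
          intro x e1 e2 e3
          by_cases hxn : x = nei
          · exact hxn ▸ hres
          · by_cases hxlt : x < nei
            · exact hdone x e1 hxlt e3
            · exact hstrong x (by omega) e2 (by omega)
        obtain ⟨nxt', heq, hlen', hptr'⟩ := ih nv res
          (PySem.List.pySetD nxt nei (hi + 2)) q (by omega) (by omega) hlr
          (by rw [PySem.List.length_pySetD]; exact hln)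
          (by push_cast at hfuel ⊢; omega) hmid1 hdone1
        have hs1 : pvScan res nei hi = pvScan res nv hi := by
          rw [pvScan_cons res hcase, if_neg hres, List.nil_append]
          exact pvScan_skip (by omega) (by omega) (fun x e1 e2 e3 => by
            by_cases hxn : x = nei
            · exact hxn ▸ hres
            · exact hstrong x (by omega) e2 (by omega))
        refine ⟨nxt', ?_, hlen', ?_⟩
        · rw [heq, hs1]
        · rw [hs1]
          exact hptr'
    · have hnei : hi < nei := by omega
      rw [pvScan_neg res hnei, pvInnerA, if_neg hcase]
      refine ⟨nxt, by simp [pvApply], hln, ?_⟩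
      intro i hi0 hin
      obtain ⟨g1, g2, g3⟩ := hmid i hi0 hin
      refine ⟨g1, g2, fun j hj1 hj2 hj3 => ?_⟩
      rcases g3 j hj1 hj2 hj3 with h | h
      · exact h
      · omega

-- one BFS layer: A's state and B's state stay related and produce the same res and queue
lemma pvLayer_eq (n k depth : Int) (hd : depth ≠ -1) :
    ∀ (curs : List Int) (res nxt ev od q : List Int),
      (∀ c ∈ curs, c < n) → PvR n res nxt ev od →
      (pvLayerA n k depth curs res nxt q).1 = (pvLayerB n k depth curs res ev od q).1
      ∧ (pvLayerA n k depth curs res nxt q).2.2 = (pvLayerB n k depth curs res ev od q).2.2.2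
      ∧ PvR n (pvLayerA n k depth curs res nxt q).1 (pvLayerA n k depth curs res nxt q).2.1
          (pvLayerB n k depth curs res ev od q).2.1 (pvLayerB n k depth curs res ev od q).2.2.1
      ∧ (∀ c ∈ (pvLayerA n k depth curs res nxt q).2.2, c ∈ q ∨ (0 ≤ c ∧ c < n)) := by
  intro curs
  induction curs with
  | nil =>
    intro res nxt ev od q hcurs hR
    exact ⟨rfl, rfl, hR, fun c hc => Or.inl hc⟩
  | cons cur rest ih =>
    intro res nxt ev od q hcurs hR
    obtain ⟨hlr, hln, hptr, hev, hod⟩ := hR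
    have hcur : cur < n := hcurs cur (List.mem_cons_self ..)
    have hrest : ∀ c ∈ rest, c < n := fun c hc => hcurs c (List.mem_cons_of_mem _ hc)
    simp only [pvLayerA, pvLayerB]
    rw [show cur - (k - 1) = cur - k + 1 by ring]
    by_cases hHL : 2 * min cur (n - k) + k - 1 - cur < 2 * max (cur - k + 1) 0 + k - 1 - cur
    · rw [if_pos hHL, pvInnerA, if_neg (by omega)]
      exact ih res nxt ev od q hrest ⟨hlr, hln, hptr, hev, hod⟩
    · rw [if_neg hHL]
      have hLH : 2 * max (cur - k + 1) 0 + k - 1 - cur ≤ 2 * min cur (n - k) + k - 1 - cur := by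
        omega
      have hlo0 : (0 : Int) ≤ 2 * max (cur - k + 1) 0 + k - 1 - cur := by omega
      have hhin : 2 * min cur (n - k) + k - 1 - cur < n := by omega
      have hparLH : (2 * min cur (n - k) + k - 1 - cur - (2 * max (cur - k + 1) 0 + k - 1 - cur)) % 2 = 0 := by
        omega
      obtain ⟨nxt', heq, hlen', hptr'⟩ :=
        pvInnerA_spec n (2 * max (cur - k + 1) 0 + k - 1 - cur)
          (2 * min cur (n - k) + k - 1 - cur) depth hlo0 hhin hparLH hd
          (n.toNat + 1) (2 * max (cur - k + 1) 0 + k - 1 - cur) res nxt q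
          (le_refl _) (by omega) hlr hln (by push_cast; omega)
          (fun i h1 h2 => by
            obtain ⟨a1, a2, a3⟩ := hptr i h1 h2
            exact ⟨a1, a2, fun j j1 j2 j3 => Or.inl (a3 j j1 j2 j3)⟩)
          (fun x e1 e2 e3 => absurd e2 (by omega))
      rw [heq]
      rw [pvMod2 _ hlo0]
      have hSmem := pvScan_mem_iff res (2 * max (cur - k + 1) 0 + k - 1 - cur)
        (2 * min cur (n - k) + k - 1 - cur)
      have hSlen : (pvApply res (pvScan res (2 * max (cur - k + 1) 0 + k - 1 - cur)
          (2 * min cur (n - k) + k - 1 - cur)) depth).length = n.toNat := by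
        rw [pvApply_length]
        exact hlr
      by_cases hp0 : (2 * max (cur - k + 1) 0 + k - 1 - cur) % 2 = 0
      · simp only [if_pos hp0]
        have hpw : ev.Pairwise (· < ·) := by
          rw [hev]
          unfold pvFilt
          exact List.Pairwise.sublist List.filter_sublist (pvRange2_pairwise 0 n)
        obtain ⟨hsl1, hsl2⟩ := pvSlice_sorted (2 * max (cur - k + 1) 0 + k - 1 - cur)
          (2 * min cur (n - k) + k - 1 - cur) hLH ev hpw
        have hchunk : (ev.drop (pvBisectLeft ev (2 * max (cur - k + 1) 0 + k - 1 - cur))).take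
            (pvBisectRight ev (2 * min cur (n - k) + k - 1 - cur)
              - pvBisectLeft ev (2 * max (cur - k + 1) 0 + k - 1 - cur))
            = pvScan res (2 * max (cur - k + 1) 0 + k - 1 - cur)
                (2 * min cur (n - k) + k - 1 - cur) := by
          rw [hsl1, hev]
          exact pvBucket_range res n _ _ hlo0 hhin hLH 0 (le_refl _) hlo0 (by omega)
        have hrest' : ev.take (pvBisectLeft ev (2 * max (cur - k + 1) 0 + k - 1 - cur))
            ++ ev.drop (pvBisectRight ev (2 * min cur (n - k) + k - 1 - cur))
            = pvFilt (pvApply res (pvScan res (2 * max (cur - k + 1) 0 + k - 1 - cur)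
                (2 * min cur (n - k) + k - 1 - cur)) depth) 0 n := by
          rw [hsl2, hev]
          exact pvBucket_rest res n _ _ depth hlo0 hhin hLH hd hlr 0 (le_refl _) hlo0 (by omega)
        rw [hchunk, hrest']
        have hfold : List.foldl (fun r nei => PySem.List.pySetD r nei depth) res
            (pvScan res (2 * max (cur - k + 1) 0 + k - 1 - cur)
              (2 * min cur (n - k) + k - 1 - cur))
            = pvApply res (pvScan res (2 * max (cur - k + 1) 0 + k - 1 - cur)
              (2 * min cur (n - k) + k - 1 - cur)) depth := rfl
        rw [hfold]
        have hod' : od = pvFilt (pvApply res (pvScan res (2 * max (cur - k + 1) 0 + k - 1 - cur)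
            (2 * min cur (n - k) + k - 1 - cur)) depth) 1 n := by
          rw [hod, pvBucket_other res n _ _ depth hlo0 hhin hlr 1 (by omega) (Or.inl (by omega))]
        obtain ⟨c1, c2, c3, c4⟩ := ih _ nxt' _ od _ hrest
          ⟨hSlen, hlen', hptr', rfl, hod'⟩
        refine ⟨c1, c2, c3, fun c hc => ?_⟩
        rcases c4 c hc with hcq | hcb
        · rcases List.mem_append.mp hcq with hq | hS
          · exact Or.inl hq
          · obtain ⟨e1, e2, _, _⟩ := (hSmem c).mp hS
            exact Or.inr ⟨by omega, by omega⟩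
        · exact Or.inr hcb
      · simp only [if_neg hp0]
        have hpw : od.Pairwise (· < ·) := by
          rw [hod]
          unfold pvFilt
          exact List.Pairwise.sublist List.filter_sublist (pvRange2_pairwise 1 n)
        obtain ⟨hsl1, hsl2⟩ := pvSlice_sorted (2 * max (cur - k + 1) 0 + k - 1 - cur)
          (2 * min cur (n - k) + k - 1 - cur) hLH od hpw
        have hchunk : (od.drop (pvBisectLeft od (2 * max (cur - k + 1) 0 + k - 1 - cur))).take
            (pvBisectRight od (2 * min cur (n - k) + k - 1 - cur)
              - pvBisectLeft od (2 * max (cur - k + 1) 0 + k - 1 - cur))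
            = pvScan res (2 * max (cur - k + 1) 0 + k - 1 - cur)
                (2 * min cur (n - k) + k - 1 - cur) := by
          rw [hsl1, hod]
          exact pvBucket_range res n _ _ hlo0 hhin hLH 1 (by omega) (by omega) (by omega)
        have hrest' : od.take (pvBisectLeft od (2 * max (cur - k + 1) 0 + k - 1 - cur))
            ++ od.drop (pvBisectRight od (2 * min cur (n - k) + k - 1 - cur))
            = pvFilt (pvApply res (pvScan res (2 * max (cur - k + 1) 0 + k - 1 - cur)
                (2 * min cur (n - k) + k - 1 - cur)) depth) 1 n := by
          rw [hsl2, hod]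
          exact pvBucket_rest res n _ _ depth hlo0 hhin hLH hd hlr 1 (by omega) (by omega) (by omega)
        rw [hchunk, hrest']
        have hfold : List.foldl (fun r nei => PySem.List.pySetD r nei depth) res
            (pvScan res (2 * max (cur - k + 1) 0 + k - 1 - cur)
              (2 * min cur (n - k) + k - 1 - cur))
            = pvApply res (pvScan res (2 * max (cur - k + 1) 0 + k - 1 - cur)
              (2 * min cur (n - k) + k - 1 - cur)) depth := rfl
        rw [hfold]
        have hev' : ev = pvFilt (pvApply res (pvScan res (2 * max (cur - k + 1) 0 + k - 1 - cur)
            (2 * min cur (n - k) + k - 1 - cur)) depth) 0 n := by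
          rw [hev, pvBucket_other res n _ _ depth hlo0 hhin hlr 0 (by omega) (Or.inl (by omega))]
        obtain ⟨c1, c2, c3, c4⟩ := ih _ nxt' ev _ _ hrest
          ⟨hSlen, hlen', hptr', hev', rfl⟩
        refine ⟨c1, c2, c3, fun c hc => ?_⟩
        rcases c4 c hc with hcq | hcb
        · rcases List.mem_append.mp hcq with hq | hS
          · exact Or.inl hq
          · obtain ⟨e1, e2, _, _⟩ := (hSmem c).mp hS
            exact Or.inr ⟨by omega, by omega⟩
        · exact Or.inr hcb

lemma pvBfs_eq (n k : Int) :
    ∀ (fuel : Nat) (q : List Int) (depth : Int) (res nxt ev od : List Int),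
      (∀ c ∈ q, c < n) → 0 ≤ depth → PvR n res nxt ev od →
      pvBfsA n k fuel q depth res nxt = pvBfsB n k fuel q depth res ev od := by
  intro fuel
  induction fuel with
  | zero =>
    intro q depth res nxt ev od hq hdep hR
    rfl
  | succ fuel ih =>
    intro q depth res nxt ev od hq hdep hR
    by_cases hqe : q = []
    · simp only [pvBfsA, pvBfsB, if_pos hqe]
    · simp only [pvBfsA, pvBfsB, if_neg hqe]
      obtain ⟨c1, c2, c3, c4⟩ := pvLayer_eq n k (depth + 1) (by omega) q res nxt ev od [] hq hR
      rw [← c1, ← c2]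
      refine ih _ _ _ _ _ _ (fun c hc => ?_) (by omega) c3
      rcases c4 c hc with hc0 | hcb
      · exact absurd hc0 (List.not_mem_nil)
      · omega

lemma pvFoldSet_length (v : Int) : ∀ (l r : List Int),
    (l.foldl (fun r node => PySem.List.pySetD r node v) r).length = r.length := by
  intro l
  induction l with
  | nil => intro r; rfl
  | cons x t ih =>
    intro r
    show (t.foldl (fun r node => PySem.List.pySetD r node v) (PySem.List.pySetD r x v)).length = _
    rw [ih, PySem.List.length_pySetD]

-- ===== VERDICT (by name: the statement is the Claim_ definition above) =====
theorem minReverseOperations_spec : Claim_equal_minReverseOperations := by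
  intro n p banned k hdom hpre
  obtain ⟨⟨hp1, hp2⟩, hban⟩ := hpre
  show minReverseOperations n p banned k = minReverseOperations_alt n p banned k
  unfold minReverseOperations minReverseOperations_alt
  show banned.foldl (fun r node => PySem.List.pySetD r node (-1))
      (pvBfsA n k (n.toNat + 2) [p] 0
        (PySem.List.pySetD (banned.foldl (fun r node => PySem.List.pySetD r node (-2))
          (List.replicate n.toNat (-1 : Int))) p 0)
        ((PySem.List.pyRange 0 n 1).map (fun i => i + 2)))
    = banned.foldl (fun r node => PySem.List.pySetD r node (-1))
      (pvBfsB n k (n.toNat + 2) [p] 0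
        (PySem.List.pySetD (banned.foldl (fun r node => PySem.List.pySetD r node (-2))
          (List.replicate n.toNat (-1 : Int))) p 0)
        ((PySem.List.pyRange 0 n 2).filter (fun i => decide (PySem.List.pyGetD
          (PySem.List.pySetD (banned.foldl (fun r node => PySem.List.pySetD r node (-2))
            (List.replicate n.toNat (-1 : Int))) p 0) i 0 = -1)))
        ((PySem.List.pyRange 1 n 2).filter (fun i => decide (PySem.List.pyGetD
          (PySem.List.pySetD (banned.foldl (fun r node => PySem.List.pySetD r node (-2))
            (List.replicate n.toNat (-1 : Int))) p 0) i 0 = -1))))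
  refine congrArg (fun r0 => banned.foldl (fun r node => PySem.List.pySetD r node (-1)) r0) ?_
  refine pvBfs_eq n k (n.toNat + 2) [p] 0 _ _ _ _ (fun c hc => ?_) (le_refl 0)
    ⟨?_, ?_, ?_, rfl, rfl⟩
  · rcases List.mem_singleton.mp hc with rfl
    exact hp2
  · rw [PySem.List.length_pySetD, pvFoldSet_length, List.length_replicate]
  · rw [List.length_map, PySem.List.length_pyRange_one]
    omega
  · intro i h1 h2
    rw [PySem.List.pyGetD_map_pyRange_of_nonneg (fun i => i + 2) n i 0 h1 h2]
    exact ⟨le_refl _, by omega, fun j hj1 hj2 hj3 => absurd hj3 (by omega)⟩
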